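-- pv_equiv track=rewrite | github.com/Lilpratik/Algorithms | String Matching Algorithms/Knuth-Morris-Pratt(KMP)/Solution.py | kmp_string_match
-- ===== SOURCE A (Python) =====
-- def kmp_string_match(text, pattern):
--     def build_lps(pattern):
--         lps = [0] * len(pattern)
--         length = 0
--         i = 1
--         while i < len(pattern):
--             if pattern[i] == pattern[length]:
--                 length += 1
--                 lps[i] = length
--                 i += 1
--             else:
--                 if length != 0:
--                     length = lps[length - 1]
--                 else:
--                     lps[i] = 0
--                     i += 1
--         return lps
--
--     lps = build_lps(pattern)
--     matches = []
--     i = j = 0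
--
--     while i < len(text):
--         if pattern[j] == text[i]:
--             i += 1
--             j += 1
--         if j == len(pattern):
--             matches.append(i - j)
--             j = lps[j - 1]
--         elif i < len(text) and pattern[j] != text[i]:
--             if j != 0:
--                 j = lps[j - 1]
--             else:
--                 i += 1
--
--     return matches
-- ===== SOURCE B (Python) =====
-- def kmp_string_match(text, pattern):
--     # Naive sliding-window scan: compare the slice at every start position.
--     n, m = len(text), len(pattern)
--     return [i for i in range(n - m + 1) if text[i:i+m] == pattern]
-- ===== Notes on version B (the rewrite author's own statement) =====
-- stated objective: simpler
-- what changed: Replaces the KMP failure-table construction and two-pointer scan with a one-line naive sliding-window scan that compares the slice text[i:i+m] with the pattern at every start position.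
-- outside the precondition, e.g. on kmp_string_match('', ''): A returns [], B returns [0]
import Mathlib
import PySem

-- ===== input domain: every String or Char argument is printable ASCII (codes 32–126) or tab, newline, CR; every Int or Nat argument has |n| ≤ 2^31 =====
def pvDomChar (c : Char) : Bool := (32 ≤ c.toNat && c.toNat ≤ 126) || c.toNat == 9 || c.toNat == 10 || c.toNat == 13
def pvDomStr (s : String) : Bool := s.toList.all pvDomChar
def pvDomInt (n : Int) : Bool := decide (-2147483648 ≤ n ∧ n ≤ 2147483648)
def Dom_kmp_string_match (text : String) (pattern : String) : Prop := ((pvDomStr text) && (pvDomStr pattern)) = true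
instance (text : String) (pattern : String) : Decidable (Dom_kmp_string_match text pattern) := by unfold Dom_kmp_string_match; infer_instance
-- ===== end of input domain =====

-- B replaces A's KMP (failure table + two-pointer scan) by a naive sliding-window scan; objective: simpler.
-- (Equivalence proved on Pre_: pattern nonempty; on an empty pattern A raises IndexError (nonempty text)
--  or returns [] (empty text), while B returns every window position.)

-- ===== PORT A =====
-- transliterations of A's two while-loops (state exactly as in the Python: lps/length/i and
-- i/j/matches). Each loop is ported as structural recursion on an explicit iteration budget
-- (`fuel`); the caller passes a budget larger than the loop's 2·len iteration bound, and the
-- correctness lemmas below prove the budget is never exhausted on inputs satisfying Pre_.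
def buildLps (p : List Char) (fuel : Nat) (lps : List Nat) (len i : Nat) : List Nat :=
  match fuel with
  | 0 => lps
  | fuel + 1 =>
    if i < p.length then
      if p.getD i ' ' = p.getD len ' ' then
        buildLps p fuel (lps.set i (len + 1)) (len + 1) (i + 1)
      else if len ≠ 0 then
        buildLps p fuel lps (lps.getD (len - 1) 0) i
      else
        buildLps p fuel (lps.set i 0) len (i + 1)
    else lps

def kmpLoop (p t : List Char) (lps : List Nat) (fuel : Nat) (i j : Nat) (acc : List Int) : List Int :=
  match fuel with
  | 0 => acc
  | fuel + 1 =>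
    if i < t.length then
      -- Python's first `if pattern[j] == text[i]` advances i,j; each arm then performs the
      -- `if j == len(pattern) ... elif ...` checks of the same loop iteration
      if p.getD j ' ' = t.getD i ' ' then
        if j + 1 = p.length then
          kmpLoop p t lps fuel (i + 1) (lps.getD (j + 1 - 1) 0)
            (acc ++ [((i + 1 : Nat) : Int) - ((j + 1 : Nat) : Int)])
        else if i + 1 < t.length ∧ ¬ p.getD (j + 1) ' ' = t.getD (i + 1) ' ' then
          if j + 1 ≠ 0 then kmpLoop p t lps fuel (i + 1) (lps.getD (j + 1 - 1) 0) acc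
          else kmpLoop p t lps fuel (i + 1 + 1) (j + 1) acc
        else kmpLoop p t lps fuel (i + 1) (j + 1) acc
      else
        if j = p.length then
          kmpLoop p t lps fuel i (lps.getD (j - 1) 0) (acc ++ [(i : Int) - (j : Int)])
        else if i < t.length ∧ ¬ p.getD j ' ' = t.getD i ' ' then
          if j ≠ 0 then kmpLoop p t lps fuel i (lps.getD (j - 1) 0) acc
          else kmpLoop p t lps fuel (i + 1) j acc
        else kmpLoop p t lps fuel i j acc
    else acc

def kmp_string_match (text : String) (pattern : String) : List Int :=
  let p := pattern.toList
  let t := text.toList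
  kmpLoop p t (buildLps p (2 * p.length + 1) (List.replicate p.length 0) 0 1)
    (2 * t.length + p.length + 1) 0 0 []

-- ===== PORT B =====
-- Source B: [i for i in range(n - m + 1) if text[i:i+m] == pattern]
-- (Nat truncation `n + 1 - m` is exactly Python's empty range for n - m + 1 <= 0;
--  the slice text[i:i+m] with 0 <= i is exactly (t.drop i).take m)
def kmp_string_match_alt (text : String) (pattern : String) : List Int :=
  let t := text.toList
  let p := pattern.toList
  ((List.range (t.length + 1 - p.length)).filter
      (fun q => decide ((t.drop q).take p.length = p))).map (fun (q : Nat) => (q : Int))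

-- ===== PRECONDITION & SPEC =====
-- Pre_ excludes the empty pattern: with nonempty text A raises IndexError there, and on ("", "")
-- A's [] and B's [0] are both defensible answers for an empty-pattern query.
def Pre_kmp_string_match (text : String) (pattern : String) : Prop := pattern ≠ ""
instance (text : String) (pattern : String) : Decidable (Pre_kmp_string_match text pattern) := by
  unfold Pre_kmp_string_match; infer_instance

def pvWitness_kmp_string_match : String × String := ("abab", "ab")

def Spec_kmp_string_match (text : String) (pattern : String) (out : List Int) : Prop := out = kmp_string_match_alt text pattern
instance (text : String) (pattern : String) (out : List Int) : Decidable (Spec_kmp_string_match text pattern out) := by unfold Spec_kmp_string_match; infer_instance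

-- ===== CLAIM (what is proved, stated in full; the proofs are below) =====
def Claim_equal_kmp_string_match : Prop := ∀ (text : String) (pattern : String), Dom_kmp_string_match text pattern → Pre_kmp_string_match text pattern → Spec_kmp_string_match text pattern (kmp_string_match text pattern)

-- ===== LEMMAS AND PROOFS =====

-- ---- generic suffix toolkit ----

theorem pvRep_getD (n k : Nat) : (List.replicate n (0:Nat)).getD k 0 = 0 := by
  rcases Nat.lt_or_ge k n with h | h
  · rw [List.getD_eq_getElem _ _ (by simpa using h)]; simp
  · exact List.getD_eq_default _ _ (by simpa using h)

theorem pvSfx_of_le {α : Type} (s1 s2 u : List α) (h1 : s1 <:+ u) (h2 : s2 <:+ u)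
    (hl : s1.length ≤ s2.length) : s1 <:+ s2 := by
  rcases List.suffix_or_suffix_of_suffix h1 h2 with h | h
  · exact h
  · have hle := List.IsSuffix.length_le h
    have heq : s2 = s1 := List.IsSuffix.eq_of_length h (by omega)
    rw [heq]

theorem pvSnoc_sfx {α : Type} (a u : List α) (x c : α) :
    a ++ [x] <:+ u ++ [c] ↔ x = c ∧ a <:+ u := by
  rw [← List.reverse_prefix]; simp [List.cons_prefix_cons, List.reverse_prefix]

theorem pvTake_snoc {α : Type} (p : List α) (k : Nat) (h : k < p.length) :
    p.take (k + 1) = p.take k ++ [p[k]] := by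
  rw [List.take_add_one, List.getElem?_eq_getElem h]; rfl

theorem pvExt (p u : List Char) (c : Char) (k : Nat) (hk : k < p.length) :
    (p.take (k + 1) <:+ u ++ [c]) ↔ (p.take k <:+ u ∧ p.getD k ' ' = c) := by
  rw [pvTake_snoc p k hk, pvSnoc_sfx, List.getD_eq_getElem _ _ hk]
  tauto

theorem pvTransfer (p u : List Char) (k j : Nat) (hkj : k ≤ j) (h : p.take j <:+ u) :
    (p.take k <:+ u) ↔ (p.take k <:+ p.take j) := by
  constructor
  · intro h'
    exact pvSfx_of_le _ _ u h' h (by simp [List.length_take]; omega)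
  · intro h'
    exact h'.trans h

-- ---- the failure function: pvF p i = length of the longest proper border of p.take i ----

def pvF (p : List Char) (i : Nat) : Nat :=
  Nat.findGreatest (fun k => p.take k <:+ p.take i) (i - 1)

theorem pvF_le (p : List Char) (i : Nat) : pvF p i ≤ i - 1 := Nat.findGreatest_le _

theorem pvF_border (p : List Char) (i : Nat) : p.take (pvF p i) <:+ p.take i := by
  unfold pvF
  exact Nat.findGreatest_spec (P := fun k => p.take k <:+ p.take i) (Nat.zero_le _) (by simp)

theorem pvF_greatest (p : List Char) (i k : Nat) (hk : k ≤ i - 1)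
    (h : p.take k <:+ p.take i) : k ≤ pvF p i := Nat.le_findGreatest hk h

-- ---- correctness of buildLps ----

def pvInvB (p : List Char) (len i : Nat) : Prop :=
  len < i ∧ p.take len <:+ p.take i ∧
    ∀ k, len < k → k < i → p.take k <:+ p.take i → p.getD k ' ' ≠ p.getD i ' '

theorem buildLps_correct (p : List Char) (fuel : Nat) (lps : List Nat) (len i : Nat) :
    lps.length = p.length → i ≤ p.length → 1 ≤ i → 2 * (p.length - i) + len < fuel →
    (∀ q, q < i → lps.getD q 0 = pvF p (q + 1)) → pvInvB p len i →
    ∀ q, q < p.length → (buildLps p fuel lps len i).getD q 0 = pvF p (q + 1) := by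
  fun_induction buildLps with
  | case1 lps len i =>
    intro hlen hile h1i hf hq hinv
    exact absurd hf (by omega)
  | case2 lps len i fuel hi hc ih =>
    intro hlen hile h1i hf hq hinv
    -- matched: p[i] = p[len]; store len+1 at i and advance
    have h2 : len < i := hinv.1
    have hlm : len < p.length := by omega
    have hsnoc := pvTake_snoc p i hi
    have hgi : p.getD i ' ' = p[i] := List.getD_eq_getElem _ _ hi
    -- len+1 is the longest proper border of p.take (i+1)
    have hP : p.take (len + 1) <:+ p.take (i + 1) := by
      rw [hsnoc, pvExt p _ _ len hlm]
      exact ⟨hinv.2.1, by rw [← hgi]; exact hc.symm⟩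
    have hG : ∀ n, len + 1 < n → n ≤ i → ¬ p.take n <:+ p.take (i + 1) := by
      intro n hn1 hn2 hs
      rw [hsnoc] at hs
      have hn1' : n - 1 < p.length := by omega
      have : n - 1 + 1 = n := by omega
      rw [← this, pvExt p _ _ (n - 1) hn1'] at hs
      exact hinv.2.2 (n - 1) (by omega) (by omega) hs.1 (by rw [hgi]; exact hs.2)
    have hFeq : pvF p (i + 1) = len + 1 := by
      unfold pvF
      rw [Nat.findGreatest_eq_iff]
      refine ⟨by omega, fun _ => hP, ?_⟩
      intro n hn1 hn2
      exact hG n hn1 (by omega)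
    apply ih
    · rw [List.length_set]; exact hlen
    · omega
    · omega
    · omega
    · intro q hqi
      by_cases hqe : q = i
      · subst hqe
        rw [List.getD_eq_getElem?_getD, List.getElem?_set_self (by omega), hFeq]; rfl
      · rw [List.getD_eq_getElem?_getD, List.getElem?_set_ne (by omega),
          ← List.getD_eq_getElem?_getD]
        exact hq q (by omega)
    · refine ⟨by omega, hP, ?_⟩
      intro k hk1 hk2 hks
      exact absurd hks (hG k hk1 (by omega))
  | case3 lps len i fuel hi hc hl ih =>
    intro hlen hile h1i hf hq hinv
    -- mismatch, len ≠ 0: fall back to lps[len-1] = pvF p len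
    have h2 : len < i := hinv.1
    have hlm : len - 1 < i := by omega
    have hfall : lps.getD (len - 1) 0 = pvF p len := by
      have := hq (len - 1) hlm
      rwa [Nat.sub_add_cancel (by omega)] at this
    have hFle : pvF p len ≤ len - 1 := pvF_le p len
    apply ih hlen hile h1i (by omega) hq
    refine ⟨by omega, ?_, ?_⟩
    · rw [hfall]
      exact (pvF_border p len).trans hinv.2.1
    · intro k hk1 hk2 hks
      rw [hfall] at hk1
      rcases Nat.lt_trichotomy k len with hkl | hkl | hkl
      · exfalso
        rw [pvTransfer p _ k len (by omega) hinv.2.1] at hks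
        have := pvF_greatest p len k (by omega) hks
        omega
      · subst hkl
        intro hcc; exact hc hcc.symm
      · exact hinv.2.2 k hkl hk2 hks
  | case4 lps len i fuel hi hc hl ih =>
    intro hlen hile h1i hf hq hinv
    -- mismatch, len = 0: lps[i] = 0 and advance
    have h2 : len < i := hinv.1
    have hl0 : len = 0 := by omega
    subst hl0
    have hsnoc := pvTake_snoc p i hi
    have hgi : p.getD i ' ' = p[i] := List.getD_eq_getElem _ _ hi
    have hG : ∀ n, 0 < n → n ≤ i → ¬ p.take n <:+ p.take (i + 1) := by
      intro n hn1 hn2 hs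
      rw [hsnoc] at hs
      have hn1' : n - 1 < p.length := by omega
      have : n - 1 + 1 = n := by omega
      rw [← this, pvExt p _ _ (n - 1) hn1'] at hs
      rcases Nat.eq_zero_or_pos (n - 1) with h0 | h0
      · rw [h0] at hs
        exact hc (by rw [hgi, hs.2])
      · exact hinv.2.2 (n - 1) h0 (by omega) hs.1 (by rw [hgi]; exact hs.2)
    have hFeq : pvF p (i + 1) = 0 := by
      unfold pvF
      rw [Nat.findGreatest_eq_iff]
      exact ⟨by omega, fun h => absurd rfl h, fun n hn1 hn2 => hG n hn1 (by omega)⟩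
    apply ih
    · rw [List.length_set]; exact hlen
    · omega
    · omega
    · omega
    · intro q hqi
      by_cases hqe : q = i
      · subst hqe
        rw [List.getD_eq_getElem?_getD, List.getElem?_set_self (by omega), hFeq]; rfl
      · rw [List.getD_eq_getElem?_getD, List.getElem?_set_ne (by omega),
          ← List.getD_eq_getElem?_getD]
        exact hq q (by omega)
    · refine ⟨by omega, List.nil_suffix, ?_⟩
      intro k hk1 hk2 hks
      exact absurd hks (hG k hk1 (by omega))
  | case5 lps len i fuel hi =>
    intro hlen hile h1i hf hq hinv q hqm
    exact hq q (by omega)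

-- ---- correctness of the main loop ----

def pvInvK (p t : List Char) (i j : Nat) : Prop :=
  j < p.length ∧ p.take j <:+ t.take i ∧
    ∀ k, j < k → k < p.length → p.take k <:+ t.take i → p.getD k ' ' ≠ t.getD i ' '

def pvOcc (p t : List Char) (i : Nat) : List Int :=
  ((List.range' (i + 1) (t.length - i)).filter (fun e => decide (p <:+ t.take e))).map
    (fun (e : Nat) => (e : Int) - (p.length : Int))

theorem pvOcc_cons_pos (p t : List Char) (i : Nat) (hi : i < t.length)
    (h : p <:+ t.take (i + 1)) :
    pvOcc p t i = (((i + 1 : Nat) : Int) - (p.length : Int)) :: pvOcc p t (i + 1) := by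
  unfold pvOcc
  have : t.length - i = (t.length - (i + 1)) + 1 := by omega
  rw [this, List.range'_succ, List.filter_cons]
  simp [h]

theorem pvOcc_cons_neg (p t : List Char) (i : Nat) (hi : i < t.length)
    (h : ¬ p <:+ t.take (i + 1)) :
    pvOcc p t i = pvOcc p t (i + 1) := by
  unfold pvOcc
  have : t.length - i = (t.length - (i + 1)) + 1 := by omega
  rw [this, List.range'_succ, List.filter_cons]
  simp [h]

-- facts available after a successful character comparison at (i, j)
theorem pvMatchStep (p t : List Char) (i j : Nat) (hi : i < t.length)
    (hinv : pvInvK p t i j) (hc : p.getD j ' ' = t.getD i ' ') :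
    (p.take (j + 1) <:+ t.take (i + 1)) ∧
      (∀ k, j + 1 < k → k ≤ p.length → ¬ p.take k <:+ t.take (i + 1)) := by
  have hsnoc := pvTake_snoc t i hi
  have hgi : t.getD i ' ' = t[i] := List.getD_eq_getElem _ _ hi
  constructor
  · rw [hsnoc, pvExt p _ _ j hinv.1]
    exact ⟨hinv.2.1, by rw [← hgi]; exact hc⟩
  · intro k hk1 hk2 hs
    rw [hsnoc] at hs
    have hk' : k - 1 < p.length := by omega
    have : k - 1 + 1 = k := by omega
    rw [← this, pvExt p _ _ (k - 1) hk'] at hs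
    exact hinv.2.2 (k - 1) (by omega) hk' hs.1 (by rw [hgi]; exact hs.2)

-- after a failed comparison with j = 0, t.take (i+1) has no nonempty border-prefix of p
theorem pvMissStep0 (p t : List Char) (i : Nat) (hi : i < t.length)
    (hinv : pvInvK p t i 0) (hc : ¬ p.getD 0 ' ' = t.getD i ' ') :
    ∀ k, 0 < k → k ≤ p.length → ¬ p.take k <:+ t.take (i + 1) := by
  intro k hk1 hk2 hs
  have hsnoc := pvTake_snoc t i hi
  have hgi : t.getD i ' ' = t[i] := List.getD_eq_getElem _ _ hi
  rw [hsnoc] at hs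
  have hk' : k - 1 < p.length := by omega
  have : k - 1 + 1 = k := by omega
  rw [← this, pvExt p _ _ (k - 1) hk'] at hs
  rcases Nat.eq_zero_or_pos (k - 1) with h0 | h0
  · rw [h0] at hs
    exact hc (by rw [hs.2, hgi])
  · exact hinv.2.2 (k - 1) h0 hk' hs.1 (by rw [hgi]; exact hs.2)

theorem kmpLoop_correct (p t : List Char) (lps : List Nat) (fuel i j : Nat) (acc : List Int) :
    (∀ q, q < p.length → lps.getD q 0 = pvF p (q + 1)) → i ≤ t.length →
    2 * (t.length - i) + j < fuel → pvInvK p t i j →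
    kmpLoop p t lps fuel i j acc = acc ++ pvOcc p t i := by
  fun_induction kmpLoop with
  | case1 i j acc =>
    intro hlps hile hf hinv
    exact absurd hf (Nat.not_lt_zero _)
  | case2 i j acc fuel hi hc hm ih =>
    intro hlps hile hf hinv
    -- match and j+1 = m: a full occurrence ends at i+1
    have hms := pvMatchStep p t i j hi hinv hc
    have hocc : p <:+ t.take (i + 1) := by
      have := hms.1; rwa [hm, List.take_length] at this
    have hfall : lps.getD (j + 1 - 1) 0 = pvF p p.length := by
      have := hlps j hinv.1
      rw [Nat.add_sub_cancel, this, hm]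
    have hinv' : pvInvK p t (i + 1) (lps.getD (j + 1 - 1) 0) := by
      rw [hfall]
      refine ⟨by have := pvF_le p p.length; omega, ?_, ?_⟩
      · exact (List.take_length ▸ pvF_border p p.length).trans hocc
      · intro k hk1 hk2 hks
        exfalso
        rw [pvTransfer p _ k p.length (by omega) (List.take_length ▸ hocc)] at hks
        have := pvF_greatest p p.length k (by omega) hks
        omega
    rw [ih hlps (by omega) (by rw [hfall]; have := pvF_le p p.length; omega) hinv',
      pvOcc_cons_pos p t i hi hocc, ← hm]
    simp
  | case3 i j acc fuel hi hc hm hel hz ih =>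
    intro hlps hile hf hinv
    -- match but j+1 < m, and the next characters mismatch: fall back to lps[j]
    have hjm : j + 1 < p.length := by have := hinv.1; omega
    have hms := pvMatchStep p t i j hi hinv hc
    have hocc : ¬ p <:+ t.take (i + 1) := by
      intro h
      exact hms.2 p.length (by omega) le_rfl (by rwa [List.take_length])
    have hfall : lps.getD (j + 1 - 1) 0 = pvF p (j + 1) := by
      have := hlps j hinv.1
      rwa [Nat.add_sub_cancel]
    have hinv' : pvInvK p t (i + 1) (lps.getD (j + 1 - 1) 0) := by
      rw [hfall]
      refine ⟨by have := pvF_le p (j + 1); omega, (pvF_border p (j + 1)).trans hms.1, ?_⟩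
      intro k hk1 hk2 hks
      rcases Nat.lt_trichotomy k (j + 1) with hkl | hkl | hkl
      · exfalso
        rw [pvTransfer p _ k (j + 1) (by omega) hms.1] at hks
        have := pvF_greatest p (j + 1) k (by omega) hks
        omega
      · subst hkl; exact hel.2
      · exact absurd hks (hms.2 k hkl (by omega))
    rw [ih hlps (by omega) (by rw [hfall]; have := pvF_le p (j + 1); omega) hinv',
      pvOcc_cons_neg p t i hi hocc]
  | case4 i j acc fuel hi hc hm hel hz ih =>
    exact (hz (by omega)).elim
  | case5 i j acc fuel hi hc hm hel ih =>
    intro hlps hile hf hinv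
    -- match, j+1 < m, next characters agree: just advance
    have hjm : j + 1 < p.length := by have := hinv.1; omega
    have hms := pvMatchStep p t i j hi hinv hc
    have hocc : ¬ p <:+ t.take (i + 1) := by
      intro h
      exact hms.2 p.length (by omega) le_rfl (by rwa [List.take_length])
    have hinv' : pvInvK p t (i + 1) (j + 1) := by
      refine ⟨hjm, hms.1, ?_⟩
      intro k hk1 hk2 hks
      exact absurd hks (hms.2 k hk1 (by omega))
    rw [ih hlps (by omega) (by omega) hinv', pvOcc_cons_neg p t i hi hocc]
  | case6 i acc fuel hi hc ih =>
    intro hlps hile hf hinv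
    exact absurd hinv.1 (lt_irrefl _)
  | case7 i j acc fuel hi hc hm hel hz ih =>
    intro hlps hile hf hinv
    -- mismatch at (i, j) with j ≠ 0: fall back to lps[j-1], i unchanged
    have hjm : j < p.length := hinv.1
    have hfall : lps.getD (j - 1) 0 = pvF p j := by
      have := hlps (j - 1) (by omega)
      rwa [Nat.sub_add_cancel (by omega)] at this
    have hinv' : pvInvK p t i (lps.getD (j - 1) 0) := by
      rw [hfall]
      refine ⟨by have := pvF_le p j; omega, (pvF_border p j).trans hinv.2.1, ?_⟩
      intro k hk1 hk2 hks
      rcases Nat.lt_trichotomy k j with hkl | hkl | hkl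
      · exfalso
        rw [pvTransfer p _ k j (by omega) hinv.2.1] at hks
        have := pvF_greatest p j k (by omega) hks
        omega
      · subst hkl; intro hcc; exact hc hcc
      · exact hinv.2.2 k hkl hk2 hks
    rw [ih hlps hile (by rw [hfall]; have := pvF_le p j; omega) hinv']
  | case8 i j acc fuel hi hc hm hel hz ih =>
    intro hlps hile hf hinv
    -- mismatch with j = 0: advance i
    have hj0 : j = 0 := by omega
    subst hj0
    have hmiss := pvMissStep0 p t i hi hinv hc
    have hocc : ¬ p <:+ t.take (i + 1) := by
      intro h
      exact hmiss p.length (by have := hinv.1; omega) le_rfl (by rwa [List.take_length])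
    have hinv' : pvInvK p t (i + 1) 0 := by
      refine ⟨hinv.1, by simp, ?_⟩
      intro k hk1 hk2 hks
      exact absurd hks (hmiss k hk1 (by omega))
    rw [ih hlps (by omega) (by omega) hinv', pvOcc_cons_neg p t i hi hocc]
  | case9 i j acc fuel hi hc hm hel ih =>
    exact (hel ⟨hi, hc⟩).elim
  | case10 i j acc fuel hi =>
    intro hlps hile hf hinv
    have hni : t.length - i = 0 := by omega
    simp [pvOcc, hni]

-- ---- reindexing: suffix-at-end positions to window start positions ----

theorem pvSlice (p t : List Char) (q : Nat) (h : q + p.length ≤ t.length) :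
    (p <:+ t.take (q + p.length)) ↔ ((t.drop q).take p.length = p) := by
  rw [List.take_add]
  constructor
  · intro hs
    have hB : ((t.drop q).take p.length) <:+ (t.take q ++ (t.drop q).take p.length) :=
      List.suffix_append _ _
    have hlen : ((t.drop q).take p.length).length = p.length := by
      simp [List.length_take, List.length_drop]; omega
    have hps : p <:+ (t.drop q).take p.length :=
      pvSfx_of_le _ _ _ hs hB (by omega)
    exact (List.IsSuffix.eq_of_length hps (by omega)).symm
  · intro hB
    rw [hB]
    exact List.suffix_append _ _

theorem pvReindex (p t : List Char) (hp : p ≠ []) :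
    pvOcc p t 0 = ((List.range (t.length + 1 - p.length)).filter
      (fun q => decide ((t.drop q).take p.length = p))).map (fun (q : Nat) => (q : Int)) := by
  have hm : 0 < p.length := List.length_pos_iff.mpr hp
  unfold pvOcc
  rw [Nat.sub_zero, Nat.zero_add]
  rcases Nat.lt_or_ge t.length p.length with hlt | hle
  case inl =>
    have h0 : t.length + 1 - p.length = 0 := by omega
    rw [h0]
    have hnil : (List.range' 1 t.length).filter (fun e => decide (p <:+ t.take e)) = [] := by
      rw [List.filter_eq_nil_iff]
      intro e he hdec
      rw [List.mem_range'] at he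
      obtain ⟨ii, hii, rfl⟩ := he
      have hsfx := of_decide_eq_true hdec
      have hll := List.IsSuffix.length_le hsfx
      rw [List.length_take] at hll
      omega
    rw [hnil]
    rfl
  case inr =>
    have hsplit : List.range' 1 t.length =
        List.range' 1 (p.length - 1) ++ List.range' p.length (t.length + 1 - p.length) := by
      have h := List.range'_append (s := 1) (m := p.length - 1)
        (n := t.length + 1 - p.length) (step := 1)
      have e1 : 1 + 1 * (p.length - 1) = p.length := by omega
      have e2 : p.length - 1 + (t.length + 1 - p.length) = t.length := by omega
      rw [e1, e2] at h
      exact h.symm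
    rw [hsplit, List.filter_append]
    have hnil : (List.range' 1 (p.length - 1)).filter (fun e => decide (p <:+ t.take e)) = [] := by
      rw [List.filter_eq_nil_iff]
      intro e he hdec
      rw [List.mem_range'] at he
      obtain ⟨ii, hii, rfl⟩ := he
      have hsfx := of_decide_eq_true hdec
      have hll := List.IsSuffix.length_le hsfx
      rw [List.length_take] at hll
      omega
    rw [hnil, List.nil_append, List.range'_eq_map_range, List.filter_map, List.map_map]
    have hfc : List.filter ((fun e => decide (p <:+ t.take e)) ∘ (fun x => p.length + x))
          (List.range (t.length + 1 - p.length))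
        = List.filter (fun q => decide ((t.drop q).take p.length = p))
          (List.range (t.length + 1 - p.length)) := by
      apply List.filter_congr
      intro q hq
      rw [List.mem_range] at hq
      simp only [Function.comp_apply, decide_eq_decide]
      rw [Nat.add_comm]
      exact pvSlice p t q (by omega)
    rw [hfc]
    apply List.map_congr_left
    intro q hq
    simp only [Function.comp_apply]
    push_cast
    ring

-- ---- assembling the verdict ----

-- ===== VERDICT (by name: the statement is the Claim_ definition above) =====
theorem kmp_string_match_spec : Claim_equal_kmp_string_match := by
  intro text pattern hdom hpre
  unfold Spec_kmp_string_match
  have hp : pattern.toList ≠ [] := by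
    intro h
    exact hpre (by rwa [String.toList_eq_nil_iff] at h)
  have hm : 0 < pattern.toList.length := List.length_pos_iff.mpr hp
  rw [kmp_string_match, kmp_string_match_alt]
  have hlps : ∀ q, q < pattern.toList.length →
      (buildLps pattern.toList (2 * pattern.toList.length + 1)
        (List.replicate pattern.toList.length 0) 0 1).getD q 0 = pvF pattern.toList (q + 1) := by
    apply buildLps_correct
    · simp
    · omega
    · omega
    · omega
    · intro q hq
      have hq0 : q = 0 := by omega
      subst hq0
      rw [pvRep_getD]
      unfold pvF
      rw [Nat.sub_self, Nat.findGreatest_zero]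
    · exact ⟨Nat.zero_lt_one, by simp, fun k hk1 hk2 _ => absurd hk1 (by omega)⟩
  have hinv0 : pvInvK pattern.toList text.toList 0 0 := by
    refine ⟨hm, by simp, ?_⟩
    intro k hk1 hk2 hks
    exfalso
    rw [List.take_zero, List.suffix_nil] at hks
    have := congrArg List.length hks
    rw [List.length_take] at this
    have h2 : min k pattern.toList.length = 0 := by simpa using this
    omega
  rw [kmpLoop_correct _ _ _ _ _ _ _ hlps (by omega) (by omega) hinv0, List.nil_append]
  exact pvReindex _ _ hp
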